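-- pv_equiv track=rewrite | github.com/TheDarkLightX/Formal_Methods_Philosophy | experiments/math_object_innovation_v19/run_cycle.py | summarize_blocks
-- ===== SOURCE A (Python) =====
-- from collections import defaultdict
--
-- def summarize_blocks(viable, flags, key):
--     blocks = defaultdict(lambda: {"count": 0, "safe": 0})
--     for item, ok in zip(viable, flags):
--         blocks[item[key]]["count"] += 1
--         blocks[item[key]]["safe"] += int(ok)
--     ordered = []
--     for value in sorted(blocks, reverse=True):
--         ordered.append({
--             "value": value,
--             "count": blocks[value]["count"],
--             "safe": blocks[value]["safe"],
--             "unsafe": blocks[value]["count"] - blocks[value]["safe"],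
--         })
--     return ordered
-- ===== SOURCE B (Python) =====
-- def summarize_blocks(viable, flags, key):
--     pairs = sorted(((item[key], ok) for item, ok in zip(viable, flags)),
--                    key=lambda p: p[0], reverse=True)
--     out = []
--     i, n = 0, len(pairs)
--     while i < n:
--         v = pairs[i][0]
--         j, safe = i, 0
--         while j < n and pairs[j][0] == v:
--             safe += int(pairs[j][1])
--             j += 1
--         count = j - i
--         out.append({"value": v, "count": count, "safe": safe, "unsafe": count - safe})
--         i = j
--     return out
-- ===== Notes on version B (the rewrite author's own statement) =====
-- stated objective: alternative
-- what changed: Replaces A's defaultdict-of-counters plus sorted(keys) pass with sorting the (value, flag) pairs descending once and a single run-length scan that counts each consecutive group.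
import Mathlib
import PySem

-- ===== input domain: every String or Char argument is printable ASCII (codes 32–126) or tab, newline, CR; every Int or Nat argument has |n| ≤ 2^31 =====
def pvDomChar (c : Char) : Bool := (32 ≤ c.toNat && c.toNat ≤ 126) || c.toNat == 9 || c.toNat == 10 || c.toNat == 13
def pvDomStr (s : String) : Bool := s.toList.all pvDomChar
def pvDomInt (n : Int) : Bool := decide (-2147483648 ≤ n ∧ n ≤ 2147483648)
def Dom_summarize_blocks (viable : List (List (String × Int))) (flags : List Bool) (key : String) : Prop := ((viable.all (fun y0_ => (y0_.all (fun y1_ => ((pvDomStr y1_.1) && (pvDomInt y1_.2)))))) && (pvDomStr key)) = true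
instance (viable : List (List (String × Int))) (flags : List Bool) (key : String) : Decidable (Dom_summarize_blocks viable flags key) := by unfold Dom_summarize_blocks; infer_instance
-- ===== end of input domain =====

-- B replaces A's defaultdict-of-counters + sorted-keys pass with one descending sort of the
-- (value, flag) pairs and a single run-length scan over the consecutive groups (alternative
-- decomposition, same O(n log n) cost).

-- ===== PORT A =====
def summarize_blocks (viable : List (List (String × Int))) (flags : List Bool) (key : String) : List (List (String × Int)) :=
  let blocks : PySem.Dict Int (Int × Int) :=
    (viable.zip flags).foldl
      (fun d p =>
        ((d.modify ((List.lookup key p.1).getD 0) (0, 0) (fun c => (c.1 + 1, c.2))).modify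
          ((List.lookup key p.1).getD 0) (0, 0) (fun c => (c.1, c.2 + (if p.2 then 1 else 0)))))
      PySem.Dict.empty
  (PySem.List.sorted blocks.keys (fun x => x) true).map
    (fun v =>
      [("value", v), ("count", (blocks.getD v (0, 0)).1), ("safe", (blocks.getD v (0, 0)).2),
       ("unsafe", (blocks.getD v (0, 0)).1 - (blocks.getD v (0, 0)).2)])

-- ===== PORT B =====
-- the run-length scan: B's outer while loop over the sorted pairs, one recursive step per group
def pvRuns : List (Int × Bool) → List (List (String × Int))
  | [] => []
  | (v, ok) :: rest =>
    [("value", v), ("count", (1 : Int) + (rest.takeWhile (fun p => p.1 == v)).length),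
     ("safe", (if ok then (1 : Int) else 0) + ((rest.takeWhile (fun p => p.1 == v)).map (fun p => if p.2 then (1 : Int) else 0)).sum),
     ("unsafe", ((1 : Int) + (rest.takeWhile (fun p => p.1 == v)).length) -
        ((if ok then (1 : Int) else 0) + ((rest.takeWhile (fun p => p.1 == v)).map (fun p => if p.2 then (1 : Int) else 0)).sum))]
      :: pvRuns (rest.dropWhile (fun p => p.1 == v))
termination_by l => l.length
decreasing_by exact Nat.lt_succ_of_le (List.length_dropWhile_le _ _)

def summarize_blocks_alt (viable : List (List (String × Int))) (flags : List Bool) (key : String) : List (List (String × Int)) :=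
  pvRuns (PySem.List.sorted
    ((viable.zip flags).map (fun p => ((List.lookup key p.1).getD 0, p.2)))
    (fun p => p.1) true)

-- ===== PRECONDITION & SPEC =====
-- Pre_ excludes exactly the inputs where Python's item[key] raises KeyError (key missing from a zipped item)
def Pre_summarize_blocks (viable : List (List (String × Int))) (flags : List Bool) (key : String) : Prop :=
  ((viable.zip flags).all (fun p => (List.lookup key p.1).isSome)) = true
instance (viable : List (List (String × Int))) (flags : List Bool) (key : String) : Decidable (Pre_summarize_blocks viable flags key) := by unfold Pre_summarize_blocks; infer_instance

def pvWitness_summarize_blocks : (List (List (String × Int))) × List Bool × String :=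
  ([[("k", 2)], [("k", 1)], [("k", 2)]], [true, false, true], "k")

def Spec_summarize_blocks (viable : List (List (String × Int))) (flags : List Bool) (key : String) (out : List (List (String × Int))) : Prop := out = summarize_blocks_alt viable flags key
instance (viable : List (List (String × Int))) (flags : List Bool) (key : String) (out : List (List (String × Int))) : Decidable (Spec_summarize_blocks viable flags key out) := by unfold Spec_summarize_blocks; infer_instance

-- ===== CLAIM (what is proved, stated in full; the proofs are below) =====
def Claim_equal_summarize_blocks : Prop := ∀ (viable : List (List (String × Int))) (flags : List Bool) (key : String), Dom_summarize_blocks viable flags key → Pre_summarize_blocks viable flags key → Spec_summarize_blocks viable flags key (summarize_blocks viable flags key)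

-- ===== LEMMAS AND PROOFS =====

-- abbreviations used only by the proofs: the count / safe-count of one value, one output row, A's loop body
def pvCnt (v : Int) (l : List (Int × Bool)) : Int := l.countP (fun p => p.1 == v)
def pvSf (v : Int) (l : List (Int × Bool)) : Int :=
  ((l.filter (fun p => p.1 == v)).map (fun p => if p.2 then (1 : Int) else 0)).sum
def pvRow (v c s : Int) : List (String × Int) :=
  [("value", v), ("count", c), ("safe", s), ("unsafe", c - s)]
def pvStep (d : PySem.Dict Int (Int × Int)) (q : Int × Bool) : PySem.Dict Int (Int × Int) :=
  (d.modify q.1 (0, 0) (fun c => (c.1 + 1, c.2))).modify q.1 (0, 0)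
    (fun c => (c.1, c.2 + (if q.2 then 1 else 0)))

theorem pv_keys_step (d : PySem.Dict Int (Int × Int)) (q : Int × Bool) :
    (pvStep d q).keys = PySem.Set.add d.keys q.1 := by
  simp only [pvStep, PySem.Dict.keys_modify]
  by_cases h : d.contains q.1
  · rw [PySem.Dict.keys_insert_of_contains _ _ (by simp [PySem.Dict.contains_modify]),
        PySem.Dict.keys_modify,
        PySem.Dict.keys_insert_of_contains _ _ h,
        PySem.Set.add_of_mem (by rwa [← PySem.Dict.contains_iff_mem_keys])]
  · rw [PySem.Dict.keys_insert_of_contains _ _ (by simp [PySem.Dict.contains_modify]),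
        PySem.Dict.keys_modify,
        PySem.Dict.keys_insert_of_not_contains _ _ (by simp_all),
        PySem.Set.add_of_not_mem]
    intro hm; exact h (by rwa [PySem.Dict.contains_iff_mem_keys])

theorem pv_keysA (l : List (Int × Bool)) : ∀ d : PySem.Dict Int (Int × Int),
    (l.foldl pvStep d).keys = PySem.Set.update d.keys (l.map Prod.fst) := by
  induction l with
  | nil => intro d; simp [PySem.Set.update_nil]
  | cons q t ih =>
    intro d
    rw [List.foldl_cons, ih, List.map_cons, PySem.Set.update_cons, pv_keys_step]

theorem pv_getDA (l : List (Int × Bool)) : ∀ (d : PySem.Dict Int (Int × Int)) (v : Int),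
    (l.foldl pvStep d).getD v (0, 0)
      = ((d.getD v (0, 0)).1 + pvCnt v l, (d.getD v (0, 0)).2 + pvSf v l) := by
  induction l with
  | nil => intro d v; simp [pvCnt, pvSf]
  | cons q t ih =>
    intro d v
    rw [List.foldl_cons, ih]
    simp only [pvStep, PySem.Dict.getD_modify]
    by_cases h : v = q.1
    · subst h
      simp [pvCnt, pvSf]
      constructor
      · ring
      · ring
    · have h' : ¬ q.1 = v := fun hh => h hh.symm
      simp [pvCnt, pvSf, h, h']

theorem pv_pairwise_gt_sorted_rev (u : List Int) (hu : u.Nodup) :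
    (PySem.List.sorted u (fun x => x) true).Pairwise (fun a b => b < a) := by
  have hp := PySem.List.sorted_pairwise_rev u (fun x => x)
  have hn : (PySem.List.sorted u (fun x => x) true).Nodup :=
    (PySem.List.sorted_perm u (fun x => x) true).nodup_iff.mpr hu
  exact (hp.and hn).imp (fun {a b} h => lt_of_le_of_ne h.1 (Ne.symm h.2))

theorem pv_sorted_rev_set_congr (u w : List Int) (hu : u.Nodup) (hperm : u.Perm w) :
    PySem.List.sorted u (fun x => x) true = PySem.List.sorted w (fun x => x) true := by
  have h1 : (PySem.List.sorted u (fun x => x) true).Perm w :=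
    (PySem.List.sorted_perm u (fun x => x) true).trans hperm
  exact (PySem.List.sorted_rev_eq_of_perm_of_pairwise_gt w _ (fun x => x) h1
    (pv_pairwise_gt_sorted_rev u hu)).symm

-- every pair left after dropping the v-run has first component < v
theorem pv_dropWhile_lt (v : Int) : ∀ (rest : List (Int × Bool)),
    ((v :: rest.map Prod.fst).Pairwise (fun a b => b ≤ a)) →
    ∀ p ∈ rest.dropWhile (fun p => p.1 == v), p.1 < v := by
  intro rest
  induction rest with
  | nil => intro _ p hp; simp at hp
  | cons q t ih =>
    intro h p hp
    by_cases hq : q.1 = v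
    · rw [List.dropWhile_cons_of_pos (by simp [hq])] at hp
      refine ih ?_ p hp
      have : (v :: t.map Prod.fst).Sublist (v :: q.1 :: t.map Prod.fst) :=
        List.Sublist.cons₂ _ (List.sublist_cons_self _ _)
      exact h.sublist (by simpa using this)
    · rw [List.dropWhile_cons_of_neg (by simp [hq])] at hp
      have h1 : ∀ x ∈ (q :: t).map Prod.fst, x ≤ v := (List.pairwise_cons.mp h).1
      have hqv : q.1 < v := lt_of_le_of_ne (h1 q.1 (by simp)) hq
      rcases List.mem_cons.mp hp with rfl | hpt
      · exact hqv
      · have h2 : (q.1 :: t.map Prod.fst).Pairwise (fun a b => b ≤ a) := by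
          simpa using (List.pairwise_cons.mp h).2
        exact lt_of_le_of_lt ((List.pairwise_cons.mp h2).1 p.1 (List.mem_map_of_mem hpt)) hqv

-- B's run-length scan of a descending pair list produces one row per distinct value, in descending order
theorem pv_runs_spec (s : List (Int × Bool)) :
    (s.map Prod.fst).Pairwise (fun a b => b ≤ a) →
    pvRuns s = (PySem.List.sorted (PySem.Set.ofList (s.map Prod.fst)) (fun x => x) true).map
      (fun v => pvRow v (pvCnt v s) (pvSf v s)) := by
  induction s using pvRuns.induct with
  | case1 =>
    intro _
    simp [pvRuns, PySem.Set.ofList_nil, PySem.List.sorted_eq_nil_iff]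
  | case2 v ok rest ih =>
    intro h
    set run := rest.takeWhile (fun p => p.1 == v) with hrundef
    set rest' := rest.dropWhile (fun p => p.1 == v) with hrest'def
    have hsplit : run ++ rest' = rest := List.takeWhile_append_dropWhile
    have hrun : ∀ p ∈ run, p.1 = v := by
      intro p hp
      have := List.mem_takeWhile_imp hp
      simpa using this
    have hlt : ∀ p ∈ rest', p.1 < v := pv_dropWhile_lt v rest (by simp at h ⊢; exact h)
    have hpair' : (rest'.map Prod.fst).Pairwise (fun a b => b ≤ a) := by
      refine List.Pairwise.sublist ?_ h
      refine List.Sublist.trans ?_ (List.sublist_cons_self _ _)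
      exact (List.dropWhile_sublist _).map _
    have hihr := ih hpair'
    have hperm : (PySem.Set.ofList (((v, ok) :: rest).map Prod.fst)).Perm
        (v :: PySem.Set.ofList (rest'.map Prod.fst)) := by
      refine (List.perm_ext_iff_of_nodup (PySem.Set.nodup_ofList _) ?_).mpr ?_
      · refine List.nodup_cons.mpr ⟨?_, (PySem.Set.nodup_ofList _)⟩
        intro hv
        rcases List.mem_map.mp ((PySem.Set.mem_ofList _ _).mp hv) with ⟨p, hp, hpv⟩
        exact absurd (hpv ▸ hlt p hp) (lt_irrefl v)
      · intro a
        simp only [PySem.Set.mem_ofList, List.map_cons, List.mem_cons]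
        constructor
        · rintro (rfl | ha)
          · exact Or.inl rfl
          · rw [← hsplit, List.map_append, List.mem_append] at ha
            rcases ha with ha | ha
            · rcases List.mem_map.mp ha with ⟨p, hp, rfl⟩
              exact Or.inl (hrun p hp)
            · exact Or.inr ha
        · rintro (rfl | ha)
          · exact Or.inl rfl
          · refine Or.inr ?_
            rw [← hsplit, List.map_append, List.mem_append]
            exact Or.inr ha
    have hsorted : PySem.List.sorted (PySem.Set.ofList (((v, ok) :: rest).map Prod.fst)) (fun x => x) true
        = v :: PySem.List.sorted (PySem.Set.ofList (rest'.map Prod.fst)) (fun x => x) true := by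
      refine PySem.List.sorted_rev_eq_of_perm_of_pairwise_gt _ _ (fun x => x) ?_ ?_
      · exact ((PySem.List.sorted_perm _ (fun x => x) true).cons v).trans hperm.symm
      · refine List.pairwise_cons.mpr ⟨?_, pv_pairwise_gt_sorted_rev _ (PySem.Set.nodup_ofList _)⟩
        intro b hb
        rcases List.mem_map.mp ((PySem.Set.mem_ofList _ _).mp
          ((PySem.List.sorted_perm _ (fun x => x) true).mem_iff.mp hb)) with ⟨p, hp, rfl⟩
        exact hlt p hp
    have hcnt : pvCnt v ((v, ok) :: rest) = 1 + (run.length : Int) := by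
      rw [pvCnt, List.countP_cons, ← hsplit, List.countP_append]
      rw [List.countP_eq_length.mpr (fun p hp => by simp [hrun p hp]),
          List.countP_eq_zero.mpr (fun p hp => by simp [Int.ne_of_lt (hlt p hp)])]
      push_cast; simp; ring
    have hsf : pvSf v ((v, ok) :: rest)
        = (if ok then (1 : Int) else 0) + (run.map (fun p => if p.2 then (1 : Int) else 0)).sum := by
      rw [pvSf, List.filter_cons, ← hsplit, List.filter_append,
          List.filter_eq_self.mpr (fun p hp => by simp [hrun p hp]),
          List.filter_eq_nil_iff.mpr (fun p hp => by simp [Int.ne_of_lt (hlt p hp)])]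
      simp
    have htail : ∀ x ∈ PySem.List.sorted (PySem.Set.ofList (rest'.map Prod.fst)) (fun x => x) true,
        pvCnt x ((v, ok) :: rest) = pvCnt x rest' ∧ pvSf x ((v, ok) :: rest) = pvSf x rest' := by
      intro x hx
      rcases List.mem_map.mp ((PySem.Set.mem_ofList _ _).mp
        ((PySem.List.sorted_perm _ (fun x => x) true).mem_iff.mp hx)) with ⟨p, hp, rfl⟩
      have hxv : p.1 ≠ v := Int.ne_of_lt (hlt p hp)
      constructor
      · rw [pvCnt, pvCnt, List.countP_cons, ← hsplit, List.countP_append,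
            List.countP_eq_zero.mpr (fun q hq => by simp [hrun q hq, Ne.symm hxv])]
        simp [Ne.symm hxv]
      · rw [pvSf, pvSf, List.filter_cons, ← hsplit, List.filter_append,
            List.filter_eq_nil_iff.mpr (fun q hq => by simp [hrun q hq, Ne.symm hxv])]
        simp [Ne.symm hxv]
    rw [pvRuns, hsorted, List.map_cons, hihr]
    congr 1
    · rw [pvRow, hcnt, hsf, ← hrundef]
    · exact (List.map_congr_left (fun x hx => by rw [pvRow, pvRow, (htail x hx).1, (htail x hx).2])).symm

-- ===== VERDICT (by name: the statement is the Claim_ definition above) =====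
theorem summarize_blocks_spec : Claim_equal_summarize_blocks := by
  intro viable flags key _ _
  unfold Spec_summarize_blocks
  show summarize_blocks viable flags key = summarize_blocks_alt viable flags key
  simp only [summarize_blocks, summarize_blocks_alt]
  set m := (viable.zip flags).map (fun p => ((List.lookup key p.1).getD 0, p.2)) with hm
  set s := PySem.List.sorted m (fun p => p.1) true with hs
  have hfold : (viable.zip flags).foldl
      (fun d p => ((d.modify ((List.lookup key p.1).getD 0) (0, 0) (fun c => (c.1 + 1, c.2))).modify
          ((List.lookup key p.1).getD 0) (0, 0) (fun c => (c.1, c.2 + (if p.2 then 1 else 0)))))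
      PySem.Dict.empty = m.foldl pvStep PySem.Dict.empty := by
    rw [hm, List.foldl_map]
    rfl
  rw [hfold]
  have hkeys : (m.foldl pvStep PySem.Dict.empty).keys = PySem.Set.ofList (m.map Prod.fst) := by
    rw [pv_keysA, PySem.Dict.keys_empty, PySem.Set.update_nil_left]
  have hgetD : ∀ v, (m.foldl pvStep PySem.Dict.empty).getD v (0, 0) = (pvCnt v m, pvSf v m) := by
    intro v; rw [pv_getDA, PySem.Dict.getD_empty]; simp
  have hpair : (s.map Prod.fst).Pairwise (fun a b => b ≤ a) :=
    List.pairwise_map.mpr (PySem.List.sorted_pairwise_rev m (fun p => p.1))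
  rw [pv_runs_spec s hpair, hkeys]
  have hsm : s.Perm m := PySem.List.sorted_perm m (fun p => p.1) true
  have hsorteq : PySem.List.sorted (PySem.Set.ofList (s.map Prod.fst)) (fun x => x) true
      = PySem.List.sorted (PySem.Set.ofList (m.map Prod.fst)) (fun x => x) true := by
    apply pv_sorted_rev_set_congr _ _ (PySem.Set.nodup_ofList _)
    refine (List.perm_ext_iff_of_nodup (PySem.Set.nodup_ofList _) (PySem.Set.nodup_ofList _)).mpr ?_
    intro a
    rw [PySem.Set.mem_ofList, PySem.Set.mem_ofList]
    exact (hsm.map Prod.fst).mem_iff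
  rw [hsorteq]
  refine List.map_congr_left (fun v _ => ?_)
  have hc : pvCnt v s = pvCnt v m := by
    rw [pvCnt, pvCnt, List.Perm.countP_eq _ hsm]
  have hf : pvSf v s = pvSf v m := by
    rw [pvSf, pvSf]; exact List.Perm.sum_eq ((hsm.filter _).map _)
  rw [hgetD v, pvRow, hc, hf]
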